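-- pv_equiv track=rewrite | github.com/sarturko-maker/vibe-legal-redliner | python/adeu/utils/docx.py | apply_formatting_to_segments
-- ===== SOURCE A (Python) =====
-- def apply_formatting_to_segments(text: str, prefix: str, suffix: str) -> str:
--     """
--     Applies formatting markers to text, ensuring newlines are excluded from the formatting.
--     Example: "**A\nB**" -> "**A**\n**B**"
--     """
--     if not prefix and not suffix:
--         return text
--     if not text:
--         return ""
--
--     if "\n" not in text:
--         return f"{prefix}{text}{suffix}"
--
--     parts = text.split("\n")
--     return "\n".join(f"{prefix}{p}{suffix}" if p else "" for p in parts)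
-- ===== SOURCE B (Python) =====
-- def apply_formatting_to_segments(text: str, prefix: str, suffix: str) -> str:
--     """Single-pass state machine over the characters: each maximal non-newline
--     run is wrapped with prefix/suffix when it is flushed (at a newline or at
--     the end); newlines are emitted as-is and empty runs are not wrapped."""
--     if not prefix and not suffix:
--         return text
--     out = []
--     run = []
--     for ch in text:
--         if ch == "\n":
--             if run:
--                 out.append(prefix)
--                 out.extend(run)
--                 out.append(suffix)
--             run = []
--             out.append("\n")
--         else:
--             run.append(ch)
--     if run:
--         out.append(prefix)
--         out.extend(run)
--         out.append(suffix)
--     return "".join(out)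
-- ===== Notes on version B (the rewrite author's own statement) =====
-- stated objective: alternative
-- what changed: Replaces split-on-newline + join of wrapped parts with a single left-to-right character state machine that flushes and wraps each maximal non-newline run as it ends.
import Mathlib
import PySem

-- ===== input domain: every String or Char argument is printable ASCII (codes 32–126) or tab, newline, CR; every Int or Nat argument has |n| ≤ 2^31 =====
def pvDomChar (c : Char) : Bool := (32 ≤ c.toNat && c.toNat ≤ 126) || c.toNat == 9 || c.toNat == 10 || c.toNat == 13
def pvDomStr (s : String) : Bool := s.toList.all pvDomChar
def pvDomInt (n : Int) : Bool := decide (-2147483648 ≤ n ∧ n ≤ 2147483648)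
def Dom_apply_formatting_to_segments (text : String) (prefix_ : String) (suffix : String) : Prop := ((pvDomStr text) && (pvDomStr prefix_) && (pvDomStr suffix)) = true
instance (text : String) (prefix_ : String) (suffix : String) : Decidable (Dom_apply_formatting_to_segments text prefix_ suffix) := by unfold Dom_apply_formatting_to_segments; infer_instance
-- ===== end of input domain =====

-- B replaces A's split-on-"\n"/join pipeline with a single-pass character state
-- machine (objective: alternative; same cost, genuinely different traversal).

-- ===== PORT A =====
-- literal transliteration of A: guard on empty markers, empty text, the
-- no-newline fast path, else split on "\n" and join the wrapped parts
def apply_formatting_to_segments (text : String) (prefix_ : String) (suffix : String) : String :=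
  if prefix_.toList = [] ∧ suffix.toList = [] then text
  else if text.toList = [] then ""
  else if PySem.Chars.isIn ['\n'] text.toList = false then
    String.ofList (prefix_.toList ++ text.toList ++ suffix.toList)
  else
    let parts := PySem.Chars.splitOn text.toList ['\n']
    String.ofList (PySem.Chars.join ['\n']
      (parts.map (fun p => if p = [] then [] else prefix_.toList ++ p ++ suffix.toList)))

-- ===== PORT B =====
-- B's flush of a pending run: empty runs contribute nothing, else wrap
def pvFlush (pre suf run : List Char) : List Char :=
  if run = [] then [] else pre ++ run ++ suf

-- B's loop body: state = (output so far, current non-newline run)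
def pvStep (pre suf : List Char) (st : List Char × List Char) (c : Char) : List Char × List Char :=
  if c = '\n' then (st.1 ++ pvFlush pre suf st.2 ++ ['\n'], [])
  else (st.1, st.2 ++ [c])

def apply_formatting_to_segments_alt (text : String) (prefix_ : String) (suffix : String) : String :=
  if prefix_.toList = [] ∧ suffix.toList = [] then text
  else
    let st := text.toList.foldl (pvStep prefix_.toList suffix.toList) ([], [])
    String.ofList (st.1 ++ pvFlush prefix_.toList suffix.toList st.2)

-- ===== PRECONDITION & SPEC =====
def Spec_apply_formatting_to_segments (text : String) (prefix_ : String) (suffix : String) (out : String) : Prop := out = apply_formatting_to_segments_alt text prefix_ suffix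
instance (text : String) (prefix_ : String) (suffix : String) (out : String) : Decidable (Spec_apply_formatting_to_segments text prefix_ suffix out) := by unfold Spec_apply_formatting_to_segments; infer_instance

-- ===== CLAIM (what is proved, stated in full; the proofs are below) =====
def Claim_equal_apply_formatting_to_segments : Prop := ∀ (text : String) (prefix_ : String) (suffix : String), Dom_apply_formatting_to_segments text prefix_ suffix → Spec_apply_formatting_to_segments text prefix_ suffix (apply_formatting_to_segments text prefix_ suffix)

-- ===== LEMMAS AND PROOFS =====

-- reference recursion: the segments of l split at '\n', with cur the pending prefix
def pvSegs (cur : List Char) : List Char → List (List Char)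
  | [] => [cur]
  | c :: rest => if c = '\n' then cur :: pvSegs [] rest else pvSegs (cur ++ [c]) rest

-- reference recursion for B's loop result
def pvWrapJoin (pre suf run : List Char) : List Char → List Char
  | [] => pvFlush pre suf run
  | c :: rest =>
      if c = '\n' then pvFlush pre suf run ++ '\n' :: pvWrapJoin pre suf [] rest
      else pvWrapJoin pre suf (run ++ [c]) rest

theorem pvSegs_ne_nil (cur l) : pvSegs cur l ≠ [] := by
  induction l generalizing cur with
  | nil => simp [pvSegs]
  | cons c rest ih => by_cases h : c = '\n' <;> simp [pvSegs, h, ih]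

theorem pvGo_eq (fuel : Nat) (l cur acc : _) (h : l.length < fuel) :
    PySem.Chars.splitOn.go ['\n'] fuel l cur acc = acc.reverse ++ pvSegs cur.reverse l := by
  induction fuel generalizing l cur acc with
  | zero => omega
  | succ fuel ih =>
    cases l with
    | nil => simp [PySem.Chars.splitOn.go, pvSegs]
    | cons c rest =>
      by_cases hc : c = '\n'
      · subst hc
        rw [PySem.Chars.splitOn.go, if_pos (by simp)]
        rw [show List.drop ['\n'].length ('\n' :: rest) = rest from rfl]
        rw [ih rest [] (List.reverse cur :: acc) (by simpa using Nat.lt_of_succ_lt_succ h)]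
        simp [pvSegs]
      · rw [PySem.Chars.splitOn.go]
        rw [if_neg (by simp [List.isPrefixOf]; exact Ne.symm hc)]
        rw [ih rest (c :: cur) acc (by simpa using Nat.lt_of_succ_lt_succ h)]
        simp [pvSegs, hc]

theorem pvSplitOn_eq (l : List Char) : PySem.Chars.splitOn l ['\n'] = pvSegs [] l := by
  unfold PySem.Chars.splitOn
  rw [pvGo_eq _ _ _ _ (by omega)]
  simp

theorem pvWrapJoin_eq_join (pre suf : List Char) (l run : List Char) :
    pvWrapJoin pre suf run l =
      PySem.Chars.join ['\n']
        ((pvSegs run l).map (fun p => if p = [] then [] else pre ++ p ++ suf)) := by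
  induction l generalizing run with
  | nil => simp [pvWrapJoin, pvSegs, PySem.Chars.join_singleton, pvFlush]
  | cons c rest ih =>
    by_cases hc : c = '\n'
    · subst hc
      obtain ⟨q, qs, hq⟩ := List.exists_cons_of_ne_nil (pvSegs_ne_nil [] rest)
      simp only [pvWrapJoin, pvSegs, if_true, List.map_cons, ih, hq]
      rw [PySem.Chars.join_cons_cons]
      simp [pvFlush]
    · simp [pvWrapJoin, pvSegs, hc, ih]

theorem pvFoldl_eq_wrapJoin (pre suf : List Char) (l out run : List Char) :
    (l.foldl (pvStep pre suf) (out, run)).1 ++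
        pvFlush pre suf (l.foldl (pvStep pre suf) (out, run)).2 =
      out ++ pvWrapJoin pre suf run l := by
  induction l generalizing out run with
  | nil => simp [pvWrapJoin]
  | cons c rest ih =>
    by_cases hc : c = '\n'
    · subst hc
      simp only [List.foldl_cons, pvStep, pvWrapJoin, ih]
      simp
    · simp [List.foldl_cons, pvStep, hc, pvWrapJoin, ih]

theorem pvWrapJoin_no_newline (pre suf : List Char) (l run : List Char)
    (h : '\n' ∉ l) : pvWrapJoin pre suf run l = pvFlush pre suf (run ++ l) := by
  induction l generalizing run with
  | nil => simp [pvWrapJoin]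
  | cons c rest ih =>
    have hc : c ≠ '\n' := fun hh => h (hh ▸ List.mem_cons_self)
    simp only [pvWrapJoin, if_neg hc]
    rw [ih _ (fun hm => h (List.mem_cons_of_mem _ hm))]
    simp

-- ===== VERDICT (by name: the statement is the Claim_ definition above) =====
theorem apply_formatting_to_segments_spec : Claim_equal_apply_formatting_to_segments := by
  intro text prefix_ suffix _
  unfold Spec_apply_formatting_to_segments
  simp only [apply_formatting_to_segments, apply_formatting_to_segments_alt]
  by_cases hps : prefix_.toList = [] ∧ suffix.toList = []
  · simp [hps]
  · rw [if_neg hps, if_neg hps]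
    rw [pvFoldl_eq_wrapJoin]
    by_cases ht : text.toList = []
    · simp [ht, pvWrapJoin, pvFlush]
    · rw [if_neg ht]
      by_cases hn : PySem.Chars.isIn ['\n'] text.toList = false
      · have hmem : '\n' ∉ text.toList := by
          intro hm
          have : ['\n'] <:+: text.toList := by
            obtain ⟨s, t, hst⟩ := List.append_of_mem hm
            exact ⟨s, t, by simp [hst]⟩
          rw [PySem.Chars.isIn_eq_false_iff] at hn
          exact hn this
        rw [if_pos hn, pvWrapJoin_no_newline _ _ _ _ hmem]
        simp [pvFlush, ht]
      · rw [if_neg hn]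
        rw [pvSplitOn_eq, pvWrapJoin_eq_join]
        simp
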